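-- pv_equiv track=rewrite | github.com/miliar/Code_Jam_Webscraper | Solutions_in_python/Problem_201/PC.py | solve
-- ===== SOURCE A (Python) =====
-- from queue import PriorityQueue as pqueue
--
-- class space:
-- 	def __init__(self, number):
-- 		self.number = number
-- 	def __lt__(self, other):
-- 		return self.number > other.number
-- 	def __eq__(self, other):
-- 		return self.number == other.number
--
-- def solve(N, K):
-- 	pq = pqueue()
-- 	pq.put(space(N))
-- 	for i in range(K-1):
-- 		n = pq.get().number-1
-- 		pq.put(space(int(n/2)))
-- 		pq.put(space(int(n/2)+n%2))
-- 	last = pq.get().number-1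
-- 	return int(last/2), int(last/2)+last%2
-- ===== SOURCE B (Python) =====
-- def _insert_run(runs, size, c):
--     # insert c gaps of the given size into the run list (sizes strictly decreasing)
--     out = []
--     i = 0
--     while i < len(runs) and runs[i][0] > size:
--         out.append(runs[i]); i += 1
--     if i < len(runs) and runs[i][0] == size:
--         out.append((size, runs[i][1] + c)); i += 1
--     else:
--         out.append((size, c))
--     out.extend(runs[i:])
--     return out
--
-- def solve(N, K):
--     # level/run simulation: all equal-sized largest gaps are split in one batch
--     runs = [(N, 1)]                  # (gap size, multiplicity), sizes strictly decreasing
--     remaining = K if K > 1 else 1    # number of heap extractions the simulation performs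
--     while True:
--         m, c = runs[0]
--         if c >= remaining:
--             last = m - 1
--             return int(last / 2), int(last / 2) + last % 2
--         remaining -= c
--         runs = runs[1:]
--         n = m - 1
--         runs = _insert_run(runs, int(n / 2), c)
--         runs = _insert_run(runs, int(n / 2) + n % 2, c)
-- ===== Notes on version B (the rewrite author's own statement) =====
-- stated objective: faster
-- what changed: Replaces the one-split-at-a-time priority-queue simulation (K-1 heap operations) by a run-length simulation that keeps a short sorted list of (gap size, multiplicity) runs and splits all equal-sized largest gaps in one batch.
-- outside the precondition, e.g. on solve(0, 4): A returns (0, 0), B returns (0, 1)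
import Mathlib
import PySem

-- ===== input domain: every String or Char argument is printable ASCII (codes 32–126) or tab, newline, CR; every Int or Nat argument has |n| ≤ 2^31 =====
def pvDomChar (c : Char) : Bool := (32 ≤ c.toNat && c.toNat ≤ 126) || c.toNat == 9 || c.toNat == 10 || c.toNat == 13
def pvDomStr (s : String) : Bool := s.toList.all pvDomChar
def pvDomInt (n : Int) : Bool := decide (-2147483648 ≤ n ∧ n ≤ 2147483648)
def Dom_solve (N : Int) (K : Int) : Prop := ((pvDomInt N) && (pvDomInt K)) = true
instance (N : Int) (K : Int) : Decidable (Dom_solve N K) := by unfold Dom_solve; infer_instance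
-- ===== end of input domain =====

-- B replaces A's one-split-at-a-time priority queue (K-1 heap operations) by a
-- run-length simulation on sorted (gap size, multiplicity) runs, splitting all
-- equal-sized largest gaps in one batch (objective: fewer loop iterations).
-- ===== PORT A =====
-- A's PriorityQueue (max-first by `number`) is modelled as a descending sorted list:
-- `get` = head, `put` = ordered insertion (ties keep the existing elements first).
def aIns (v : Int) : List Int → List Int
  | [] => [v]
  | x :: t => if x ≥ v then x :: aIns v t else v :: x :: t

-- one iteration of A's loop: pop the largest gap, push the two halves
-- (int(n/2) is truncating division: Int.tdiv; n % 2 is Python's floor mod)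
def aStep (xs : List Int) : List Int :=
  match xs with
  | [] => []
  | m :: rest =>
    let n := m - 1
    aIns (n.tdiv 2 + PySem.Int.mod n 2) (aIns (n.tdiv 2) rest)

def solve (N : Int) (K : Int) : Int × Int :=
  let final := (List.range (K - 1).toNat).foldl (fun xs _ => aStep xs) [N]
  let last := final.headD 0 - 1
  (last.tdiv 2, last.tdiv 2 + PySem.Int.mod last 2)

-- ===== PORT B =====
-- insert c gaps of a given size into the run list (sizes strictly decreasing)
def bInsertRun : List (Int × Int) → Int → Int → List (Int × Int)
  | [], size, c => [(size, c)]
  | (s, k) :: t, size, c =>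
    if s > size then (s, k) :: bInsertRun t size c
    else if s = size then (size, k + c) :: t
    else (size, c) :: (s, k) :: t

-- Source B's `while True` loop; `fuel` only bounds the iteration count (the loop performs
-- at most `remaining` iterations, so the 0-fuel branch is never reached from solve_alt)
def bLoop : Nat → List (Int × Int) → Int → Int × Int
  | 0, _, _ => (0, 0)
  | _ + 1, [], _ => (0, 0)
  | fuel + 1, (m, c) :: rest, remaining =>
    if c ≥ remaining then
      let last := m - 1
      (last.tdiv 2, last.tdiv 2 + PySem.Int.mod last 2)
    else
      let n := m - 1
      bLoop fuel (bInsertRun (bInsertRun rest (n.tdiv 2) c) (n.tdiv 2 + PySem.Int.mod n 2) c) (remaining - c)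

def solve_alt (N : Int) (K : Int) : Int × Int :=
  bLoop (K.toNat + 1) [(N, 1)] (if K > 1 then K else 1)

-- ===== PRECONDITION & SPEC =====
-- Pre_ excludes K > N with K ≥ 2 (more splits than stalls, outside the problem's
-- guarantee 1 ≤ K ≤ N): there gaps of size ≤ 0 are "split" and the truncating
-- int(n/2) makes a size-0 gap spawn a size-1 gap, so the result is an accidental
-- artefact of the individual-pop order that B's batch-per-size order need not share.
def Pre_solve (N : Int) (K : Int) : Prop := K ≤ N ∨ K ≤ 1
instance (N : Int) (K : Int) : Decidable (Pre_solve N K) := by unfold Pre_solve; infer_instance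
def pvWitness_solve : Int × Int := (5, 3)
def Spec_solve (N : Int) (K : Int) (out : Int × Int) : Prop := out = solve_alt N K
instance (N : Int) (K : Int) (out : Int × Int) : Decidable (Spec_solve N K out) := by unfold Spec_solve; infer_instance

-- ===== CLAIM (what is proved, stated in full; the proofs are below) =====
def Claim_equal_solve : Prop := ∀ (N : Int) (K : Int), Dom_solve N K → Pre_solve N K → Spec_solve N K (solve N K)

-- ===== LEMMAS AND PROOFS =====

-- abstraction: the multiset of gaps a run list denotes, as a descending list
def flat (runs : List (Int × Int)) : List Int := runs.flatMap fun p => List.replicate p.2.toNat p.1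

-- A's final answer as a function of its final heap
def ansOf (xs : List Int) : Int × Int :=
  let last := xs.headD 0 - 1
  (last.tdiv 2, last.tdiv 2 + PySem.Int.mod last 2)

-- the two children of a gap of size m
def ch1 (m : Int) : Int := (m - 1).tdiv 2
def ch2 (m : Int) : Int := (m - 1).tdiv 2 + PySem.Int.mod (m - 1) 2

-- one batch insertion on the A side: what one pop of m contributes
def stepIns (m : Int) (l : List Int) : List Int := aIns (ch2 m) (aIns (ch1 m) l)

def RunsInv (runs : List (Int × Int)) : Prop :=
  runs ≠ [] ∧ runs.Pairwise (fun a b => b.1 < a.1) ∧ ∀ p ∈ runs, 1 ≤ p.2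

lemma foldl_range_iterate (n : Nat) (x : List Int) :
    (List.range n).foldl (fun xs _ => aStep xs) x = aStep^[n] x := by
  induction n with
  | zero => simp
  | succ k ih => rw [List.range_succ, List.foldl_append, ih, Function.iterate_succ_apply']; rfl

lemma aIns_perm (v : Int) (l : List Int) : (aIns v l).Perm (v :: l) := by
  induction l with
  | nil => simp [aIns]
  | cons x t ih =>
    simp only [aIns]
    split
    · exact (ih.cons x).trans (List.Perm.swap v x t)
    · exact List.Perm.refl _

lemma mem_aIns {x v : Int} {l : List Int} (h : x ∈ aIns v l) : x = v ∨ x ∈ l := by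
  have := (aIns_perm v l).mem_iff.mp h
  simpa using this

lemma aIns_sorted {v : Int} {l : List Int} (h : l.Pairwise (· ≥ ·)) :
    (aIns v l).Pairwise (· ≥ ·) := by
  induction l with
  | nil => simp [aIns]
  | cons x t ih =>
    rw [List.pairwise_cons] at h
    simp only [aIns]
    split
    · rename_i hx
      rw [List.pairwise_cons]
      refine ⟨fun b hb => ?_, ih h.2⟩
      rcases mem_aIns hb with rfl | hb
      · exact hx
      · exact h.1 b hb
    · rename_i hx
      rw [List.pairwise_cons]
      exact ⟨fun b hb => by
        rcases List.mem_cons.mp hb with rfl | hb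
        · omega
        · have := h.1 b hb; omega, List.pairwise_cons.mpr h⟩

lemma aIns_replicate {v m : Int} (hv : v < m) (c : Nat) (rest : List Int) :
    aIns v (List.replicate c m ++ rest) = List.replicate c m ++ aIns v rest := by
  induction c with
  | zero => simp
  | succ k ih =>
    rw [List.replicate_succ, List.cons_append, List.cons_append]
    simp only [aIns]
    rw [if_pos (by omega), ih]

lemma child_sum {m : Int} (hm : 1 ≤ m) : ch1 m + ch2 m = m - 1 ∧ ch1 m < m ∧ ch2 m < m := by
  unfold ch1 ch2
  rw [PySem.Int.mod_eq_emod_of_pos (by norm_num), Int.tdiv_eq_ediv_of_nonneg (by omega)]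
  omega

lemma pop (j : Nat) : ∀ (c : Nat) (m : Int) (rest : List Int), j ≤ c → 1 ≤ m →
    aStep^[j] (List.replicate c m ++ rest) = List.replicate (c - j) m ++ (stepIns m)^[j] rest := by
  induction j with
  | zero => intro c m rest _ _; simp
  | succ i ih =>
    intro c m rest hc hm
    obtain ⟨c', rfl⟩ : ∃ c', c = c' + 1 := ⟨c - 1, by omega⟩
    rw [Function.iterate_succ_apply]
    have hstep : aStep (List.replicate (c' + 1) m ++ rest)
        = List.replicate c' m ++ stepIns m rest := by
      rw [List.replicate_succ, List.cons_append]
      show aIns (ch2 m) (aIns (ch1 m) (List.replicate c' m ++ rest)) = _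
      rw [aIns_replicate (child_sum hm).2.1, aIns_replicate (child_sum hm).2.2]
      rfl
    rw [hstep, ih c' m (stepIns m rest) (by omega) hm,
      show c' + 1 - (i + 1) = c' - i by omega, ← Function.iterate_succ_apply]

lemma stepIns_iterate_perm (m : Int) (j : Nat) (l : List Int) :
    ((stepIns m)^[j] l).Perm
      (List.replicate j (ch2 m) ++ List.replicate j (ch1 m) ++ l) := by
  induction j with
  | zero => simp
  | succ i ih =>
    rw [Function.iterate_succ_apply']
    refine ((aIns_perm _ _).trans ((aIns_perm _ _).cons _)).trans ?_
    refine ((ih.cons _).cons _).trans ?_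
    simp only [List.replicate_succ, List.cons_append, List.append_assoc]
    exact List.Perm.cons _ List.perm_middle.symm

lemma stepIns_iterate_sorted {m : Int} {l : List Int} (h : l.Pairwise (· ≥ ·)) (j : Nat) :
    ((stepIns m)^[j] l).Pairwise (· ≥ ·) := by
  induction j with
  | zero => simpa
  | succ i ih => rw [Function.iterate_succ_apply']; exact aIns_sorted (aIns_sorted ih)

lemma flat_cons (s c : Int) (t : List (Int × Int)) :
    flat ((s, c) :: t) = List.replicate c.toNat s ++ flat t := by simp [flat]

lemma mem_flat {x : Int} {runs : List (Int × Int)} (h : x ∈ flat runs) :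
    ∃ p ∈ runs, x = p.1 := by
  simp only [flat, List.mem_flatMap] at h
  obtain ⟨p, hp, hx⟩ := h
  exact ⟨p, hp, (List.eq_of_mem_replicate hx)⟩

lemma sorted_flat {runs : List (Int × Int)} (h : runs.Pairwise (fun a b => b.1 < a.1)) :
    (flat runs).Pairwise (· ≥ ·) := by
  induction runs with
  | nil => simp [flat]
  | cons p t ih =>
    rw [List.pairwise_cons] at h
    obtain ⟨s, c⟩ := p
    rw [flat_cons, List.pairwise_append]
    refine ⟨List.pairwise_replicate.mpr (Or.inr (le_refl s)), ih h.2, fun x hx y hy => ?_⟩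
    obtain ⟨q, hq, rfl⟩ := mem_flat hy
    have := h.1 q hq
    have hx' := List.eq_of_mem_replicate hx
    omega

lemma flat_insertRun_perm (v c : Int) (hc : 0 ≤ c) :
    ∀ (runs : List (Int × Int)), (∀ p ∈ runs, 0 ≤ p.2) →
    (flat (bInsertRun runs v c)).Perm (List.replicate c.toNat v ++ flat runs) := by
  intro runs
  induction runs with
  | nil => intro _; simp [bInsertRun, flat]
  | cons p t ih =>
    intro hpos
    obtain ⟨s, k⟩ := p
    simp only [bInsertRun]
    split
    · rw [flat_cons, flat_cons]
      have h1 := ih (fun q hq => hpos q (List.mem_cons_of_mem _ hq))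
      exact (List.Perm.append_left _ h1).trans (List.perm_append_comm_assoc _ _ _).symm
    · split
      · rename_i hlt heq
        subst heq
        rw [flat_cons, flat_cons]
        have hk : 0 ≤ k := hpos (s, k) List.mem_cons_self
        rw [show (k + c).toNat = c.toNat + k.toNat by omega, List.replicate_add, List.append_assoc]
      · rw [flat_cons]

lemma keys_bInsertRun {v c : Int} {q : Int × Int} : ∀ {runs : List (Int × Int)},
    q ∈ bInsertRun runs v c → q.1 = v ∨ q.1 ∈ runs.map Prod.fst := by
  intro runs
  induction runs with
  | nil => intro h; simp only [bInsertRun, List.mem_singleton] at h; left; rw [h]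
  | cons p t ih =>
    obtain ⟨s, kk⟩ := p
    intro h
    simp only [bInsertRun] at h
    split at h
    · rcases List.mem_cons.mp h with h1 | h1
      · right; rw [h1]; simp
      · rcases ih h1 with h2 | h2
        · left; exact h2
        · right; rw [List.map_cons]; exact List.mem_cons_of_mem _ h2
    · split at h
      · rcases List.mem_cons.mp h with h1 | h1
        · left; rw [h1]
        · right; rw [List.map_cons]
          exact List.mem_cons_of_mem _ (List.mem_map_of_mem h1)
      · rcases List.mem_cons.mp h with h1 | h1
        · left; rw [h1]
        · rcases List.mem_cons.mp h1 with h2 | h2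
          · right; rw [h2]; simp
          · right; rw [List.map_cons]
            exact List.mem_cons_of_mem _ (List.mem_map_of_mem h2)

lemma bInsertRun_strict {v c : Int} : ∀ {runs : List (Int × Int)},
    runs.Pairwise (fun a b => b.1 < a.1) →
    (bInsertRun runs v c).Pairwise (fun a b => b.1 < a.1) := by
  intro runs
  induction runs with
  | nil => intro _; simp [bInsertRun]
  | cons p t ih =>
    obtain ⟨s, k⟩ := p
    intro hp
    rw [List.pairwise_cons] at hp
    simp only [bInsertRun]
    split
    · rename_i hs
      rw [List.pairwise_cons]
      refine ⟨fun q hq => ?_, ih hp.2⟩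
      rcases keys_bInsertRun hq with h1 | h1
      · simpa [h1] using hs
      · obtain ⟨w, hw, hwq⟩ := List.mem_map.mp h1
        have := hp.1 w hw
        simp only at *
        omega
    · split
      · rename_i hs heq
        subst heq
        rw [List.pairwise_cons]
        exact ⟨fun q hq => hp.1 q hq, hp.2⟩
      · rename_i hs1 hs2
        rw [List.pairwise_cons]
        refine ⟨fun q hq => ?_, List.pairwise_cons.mpr hp⟩
        rcases List.mem_cons.mp hq with rfl | hq
        · simp only; omega
        · have := hp.1 q hq; simp only at *; omega

lemma bInsertRun_pos {v c : Int} (hc : 1 ≤ c) : ∀ {runs : List (Int × Int)},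
    (∀ p ∈ runs, 1 ≤ p.2) → ∀ p ∈ bInsertRun runs v c, 1 ≤ p.2 := by
  intro runs
  induction runs with
  | nil => intro _ p hp; simp only [bInsertRun, List.mem_singleton] at hp; subst hp; exact hc
  | cons q t ih =>
    obtain ⟨s, k⟩ := q
    intro hpos p hp
    have hk : 1 ≤ k := hpos (s, k) List.mem_cons_self
    simp only [bInsertRun] at hp
    split at hp
    · rcases List.mem_cons.mp hp with rfl | hp
      · exact hk
      · exact ih (fun r hr => hpos r (List.mem_cons_of_mem _ hr)) p hp
    · split at hp
      · rcases List.mem_cons.mp hp with rfl | hp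
        · simp only; omega
        · exact hpos p (List.mem_cons_of_mem _ hp)
      · rcases List.mem_cons.mp hp with rfl | hp
        · exact hc
        · exact hpos p hp

lemma bInsertRun_ne_nil {v c : Int} (runs : List (Int × Int)) : bInsertRun runs v c ≠ [] := by
  cases runs with
  | nil => simp [bInsertRun]
  | cons p t =>
    obtain ⟨s, k⟩ := p
    simp only [bInsertRun]
    split
    · simp
    · split <;> simp

lemma sum_replicate_int (n : Nat) (a : Int) : (List.replicate n a).sum = (n : Int) * a := by
  induction n with
  | zero => simp
  | succ k ih => rw [List.replicate_succ, List.sum_cons, ih]; push_cast; ring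

lemma sum_nonpos_of_all_nonpos {l : List Int} (h : ∀ x ∈ l, x ≤ 0) : l.sum ≤ 0 := by
  induction l with
  | nil => simp
  | cons x t ih =>
    rw [List.sum_cons]
    have := h x List.mem_cons_self
    have := ih (fun y hy => h y (List.mem_cons_of_mem _ hy))
    omega

lemma head_bound {m c : Int} {rest : List (Int × Int)}
    (h : ((m, c) :: rest).Pairwise (fun a b => b.1 < a.1)) :
    ∀ x ∈ flat ((m, c) :: rest), x ≤ m := by
  intro x hx
  obtain ⟨q, hq, rfl⟩ := mem_flat hx
  rcases List.mem_cons.mp hq with rfl | hq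
  · exact le_refl _
  · have := (List.pairwise_cons.mp h).1 q hq
    omega

lemma sim : ∀ (fuel : Nat) (runs : List (Int × Int)) (r : Int),
    1 ≤ r → r.toNat ≤ fuel → RunsInv runs → r ≤ (flat runs).sum →
    bLoop fuel runs r = ansOf (aStep^[(r - 1).toNat] (flat runs)) := by
  intro fuel
  induction fuel with
  | zero => intro runs r hr hf _ _; omega
  | succ fuel ih =>
    intro runs r hr hf hinv hsum
    obtain ⟨hne, hpw, hpos⟩ := hinv
    obtain ⟨p, rest, rfl⟩ : ∃ p rest, runs = p :: rest := by
      cases runs with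
      | nil => exact absurd rfl hne
      | cons p rest => exact ⟨p, rest, rfl⟩
    obtain ⟨m, c⟩ := p
    have hc1 : 1 ≤ c := hpos (m, c) List.mem_cons_self
    have hct : (1 : Nat) ≤ c.toNat := by omega
    have hflat := flat_cons m c rest
    -- the case r ≥ 2 forces the largest gap to be positive
    have hm1 : 2 ≤ r → 1 ≤ m := by
      intro hr2
      by_contra hm
      have hm' : m ≤ 0 := by omega
      have hall : ∀ x ∈ flat ((m, c) :: rest), x ≤ 0 := fun x hx => le_trans (head_bound hpw x hx) hm'
      have := sum_nonpos_of_all_nonpos hall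
      omega
    by_cases hge : c ≥ r
    · have hb : bLoop (fuel + 1) ((m, c) :: rest) r
          = ((m - 1).tdiv 2, (m - 1).tdiv 2 + PySem.Int.mod (m - 1) 2) := by
        simp only [bLoop, if_pos hge]
      rw [hb]
      by_cases hr1 : r = 1
      · subst hr1
        rw [show ((1 : Int) - 1).toNat = 0 by decide, Function.iterate_zero_apply, hflat]
        obtain ⟨d, hd⟩ : ∃ d, c.toNat = d + 1 := ⟨c.toNat - 1, by omega⟩
        rw [hd, List.replicate_succ, List.cons_append]
        rfl
      · have hm := hm1 (by omega)
        have hj : (r - 1).toNat ≤ c.toNat := by omega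
        rw [hflat, pop _ _ _ _ hj hm]
        obtain ⟨d, hd⟩ : ∃ d, c.toNat - (r - 1).toNat = d + 1 := ⟨c.toNat - (r - 1).toNat - 1, by omega⟩
        rw [hd, List.replicate_succ, List.cons_append]
        rfl
    · -- batch split of all c largest gaps
      have hr2 : 2 ≤ r := by omega
      have hm := hm1 hr2
      have hposr : ∀ p ∈ rest, 1 ≤ p.2 := fun p hp => hpos p (List.mem_cons_of_mem _ hp)
      have hpwr : rest.Pairwise (fun a b => b.1 < a.1) := (List.pairwise_cons.mp hpw).2
      set runs' := bInsertRun (bInsertRun rest (ch1 m) c) (ch2 m) c with hruns'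
      have hb : bLoop (fuel + 1) ((m, c) :: rest) r = bLoop fuel runs' (r - c) := by
        simp only [bLoop, if_neg hge]
        rfl
      -- invariants for the recursive call
      have hposi : ∀ p ∈ bInsertRun rest (ch1 m) c, 1 ≤ p.2 := bInsertRun_pos hc1 hposr
      have hpos' : ∀ p ∈ runs', 1 ≤ p.2 := bInsertRun_pos hc1 hposi
      have hpw' : runs'.Pairwise (fun a b => b.1 < a.1) :=
        bInsertRun_strict (bInsertRun_strict hpwr)
      have hne' : runs' ≠ [] := bInsertRun_ne_nil _
      -- the multiset the recursive call works on
      have hperm : (flat runs').Perm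
          (List.replicate c.toNat (ch2 m) ++ List.replicate c.toNat (ch1 m) ++ flat rest) := by
        have h1 := flat_insertRun_perm (ch1 m) c (by omega) rest (fun p hp => le_trans (by norm_num) (hposr p hp))
        have h2 := flat_insertRun_perm (ch2 m) c (by omega) (bInsertRun rest (ch1 m) c)
          (fun p hp => le_trans (by norm_num) (hposi p hp))
        rw [List.append_assoc]
        exact h2.trans (List.Perm.append_left _ h1)
      have heq : (stepIns m)^[c.toNat] (flat rest) = flat runs' := by
        have hs1 : ((stepIns m)^[c.toNat] (flat rest)).Pairwise (· ≥ ·) :=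
          stepIns_iterate_sorted (sorted_flat hpwr) _
        have hs2 : (flat runs').Pairwise (· ≥ ·) := sorted_flat hpw'
        exact ((stepIns_iterate_perm m c.toNat (flat rest)).trans hperm.symm).eq_of_pairwise
          (fun a b _ _ hab hba => le_antisymm hba hab) hs1 hs2
      -- sum bookkeeping
      have hsum' : r - c ≤ (flat runs').sum := by
        have s1 := hperm.sum_eq
        rw [List.sum_append, List.sum_append, sum_replicate_int, sum_replicate_int] at s1
        have s2 := hsum
        rw [hflat, List.sum_append, sum_replicate_int] at s2
        have hch := (child_sum hm).1
        have hcc : (c.toNat : Int) = c := by omega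
        rw [hcc] at s1 s2
        have hcm : (c.toNat : Int) * (ch2 m) + (c.toNat : Int) * (ch1 m)
            = (c.toNat : Int) * m - (c.toNat : Int) := by
          have : ch2 m + ch1 m = m - 1 := by omega
          calc (c.toNat : Int) * (ch2 m) + (c.toNat : Int) * (ch1 m)
              = (c.toNat : Int) * (ch2 m + ch1 m) := by ring
            _ = (c.toNat : Int) * (m - 1) := by rw [this]
            _ = (c.toNat : Int) * m - (c.toNat : Int) := by ring
        rw [s1]
        rw [hcc] at hcm
        linarith [s2, hcm]
      have hih := ih runs' (r - c) (by omega) (by omega) ⟨hne', hpw', hpos'⟩ hsum'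
      rw [hb, hih]
      -- relate the two iterate counts on the A side
      have hsplit : (r - 1).toNat = (r - c - 1).toNat + c.toNat := by omega
      rw [hflat, hsplit, Function.iterate_add_apply,
        pop c.toNat c.toNat m (flat rest) (le_refl _) hm, Nat.sub_self,
        List.replicate_zero, List.nil_append, heq]

-- ===== VERDICT (by name: the statement is the Claim_ definition above) =====
theorem solve_spec : Claim_equal_solve := by
  intro N K _ hpre
  unfold Spec_solve solve solve_alt
  rw [foldl_range_iterate]
  by_cases hK : K > 1
  · have hKN : K ≤ N := by
      rcases hpre with h | h
      · exact h
      · omega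
    rw [if_pos hK]
    have hflat1 : flat [(N, 1)] = [N] := by simp [flat]
    have := sim (K.toNat + 1) [(N, 1)] K (by omega) (by omega)
      ⟨by simp, by simp, fun p hp => by rw [List.mem_singleton] at hp; subst hp; norm_num⟩
      (by rw [hflat1]; simpa using hKN)
    rw [this, hflat1]
    rfl
  · rw [if_neg hK, show (K - 1).toNat = 0 by omega, Function.iterate_zero_apply]
    simp only [bLoop, if_pos (by norm_num : (1 : Int) ≥ 1)]
    rfl
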